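-- pv_equiv track=rewrite | github.com/calebjcourtney/advent-of-code | 2015/python/day03.py | part_two
-- ===== SOURCE A (Python) =====
-- class Point:
--     def __init__(self):
--         self.x = 0
--         self.y = 0
--
-- def part_two(data):
--     santa = Point()
--     robo_santa = Point()
--     visited_locations = set()
--     visited_locations.add((0, 0))
--     for i, instruction in enumerate(data):
--         if i % 2 == 0:
--             if instruction == ">":
--                 santa.x += 1
--             elif instruction == "<":
--                 santa.x -= 1
--             elif instruction == "^":
--                 santa.y += 1
--             elif instruction == "v":
--                 santa.y -= 1
--
--             visited_locations.add((santa.x, santa.y))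
--
--         elif i % 2 == 1:
--             if instruction == ">":
--                 robo_santa.x += 1
--             elif instruction == "<":
--                 robo_santa.x -= 1
--             elif instruction == "^":
--                 robo_santa.y += 1
--             elif instruction == "v":
--                 robo_santa.y -= 1
--
--             visited_locations.add((robo_santa.x, robo_santa.y))
--
--     return len(visited_locations)
-- ===== SOURCE B (Python) =====
-- def part_two(data):
--     deltas = {'>': (1, 0), '<': (-1, 0), '^': (0, 1), 'v': (0, -1)}
--
--     def walk(moves):
--         x = y = 0
--         trail = []
--         for c in moves:
--             dx, dy = deltas.get(c, (0, 0))
--             x, y = x + dx, y + dy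
--             trail.append((x, y))
--         return trail
--
--     visited = {(0, 0)}
--     visited.update(walk(data[0::2]))
--     visited.update(walk(data[1::2]))
--     return len(visited)
-- ===== Notes on version B (the rewrite author's own statement) =====
-- stated objective: simpler
-- what changed: B replaces A's single interleaved enumerate-loop with mutable Point objects and an index-parity branch by slicing the input into the two agents' move subsequences (data[0::2], data[1::2]) and walking each independently, unioning the visited positions into one set.
import Mathlib
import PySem

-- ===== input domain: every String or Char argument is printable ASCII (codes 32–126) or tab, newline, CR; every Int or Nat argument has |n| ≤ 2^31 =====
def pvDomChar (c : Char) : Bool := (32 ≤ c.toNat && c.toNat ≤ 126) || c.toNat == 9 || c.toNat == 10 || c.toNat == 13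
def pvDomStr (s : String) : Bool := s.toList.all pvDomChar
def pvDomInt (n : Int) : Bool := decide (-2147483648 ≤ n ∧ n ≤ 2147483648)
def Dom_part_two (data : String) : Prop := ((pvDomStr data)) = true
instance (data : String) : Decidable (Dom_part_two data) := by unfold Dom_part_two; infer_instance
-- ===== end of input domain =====

-- B splits the string into the two agents' move subsequences (data[0::2] / data[1::2]) and walks each
-- independently into one shared set, instead of A's single interleaved loop over enumerate(data); objective: simpler.

-- ===== PORT A =====
-- A's loop state: (santa, robo_santa, visited_locations); one step of the enumerate loop.
def pvStepA (st : (Int × Int) × (Int × Int) × PySem.Set (Int × Int)) (ic : Int × Char) :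
    (Int × Int) × (Int × Int) × PySem.Set (Int × Int) :=
  let i := ic.1
  let c := ic.2
  let santa := st.1
  let robo := st.2.1
  let vis := st.2.2
  if PySem.Int.mod i 2 = 0 then
    let santa :=
      if c = '>' then (santa.1 + 1, santa.2)
      else if c = '<' then (santa.1 - 1, santa.2)
      else if c = '^' then (santa.1, santa.2 + 1)
      else if c = 'v' then (santa.1, santa.2 - 1)
      else santa
    (santa, robo, PySem.Set.add vis santa)
  else if PySem.Int.mod i 2 = 1 then
    let robo :=
      if c = '>' then (robo.1 + 1, robo.2)
      else if c = '<' then (robo.1 - 1, robo.2)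
      else if c = '^' then (robo.1, robo.2 + 1)
      else if c = 'v' then (robo.1, robo.2 - 1)
      else robo
    (santa, robo, PySem.Set.add vis robo)
  else st

def part_two (data : String) : Int :=
  let init : (Int × Int) × (Int × Int) × PySem.Set (Int × Int) :=
    ((0, 0), (0, 0), PySem.Set.add PySem.Set.empty (0, 0))
  let res := (PySem.List.enumerate data.toList 0).foldl pvStepA init
  PySem.Set.len res.2.2

-- ===== PORT B =====
def pvDeltas : PySem.Dict Char (Int × Int) :=
  PySem.Dict.ofList [('>', (1, 0)), ('<', (-1, 0)), ('^', (0, 1)), ('v', (0, -1))]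

-- Source B's walk: the list of positions visited after each move, starting from pos.
def pvWalk (pos : Int × Int) (cs : List Char) : List (Int × Int) :=
  match cs with
  | [] => []
  | c :: rest =>
    let d := pvDeltas.getD c (0, 0)
    let p := (pos.1 + d.1, pos.2 + d.2)
    p :: pvWalk p rest

def part_two_alt (data : String) : Int :=
  let santaMoves := (PySem.List.slice? data.toList (some 0) none 2).getD []
  let roboMoves := (PySem.List.slice? data.toList (some 1) none 2).getD []
  let visited : PySem.Set (Int × Int) := PySem.Set.ofList [((0 : Int), (0 : Int))]
  let visited := PySem.Set.update visited (pvWalk (0, 0) santaMoves)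
  let visited := PySem.Set.update visited (pvWalk (0, 0) roboMoves)
  PySem.Set.len visited

-- ===== PRECONDITION & SPEC =====
def Spec_part_two (data : String) (out : Int) : Prop := out = part_two_alt data
instance (data : String) (out : Int) : Decidable (Spec_part_two data out) := by unfold Spec_part_two; infer_instance

-- ===== CLAIM (what is proved, stated in full; the proofs are below) =====
def Claim_equal_part_two : Prop := ∀ (data : String), Dom_part_two data → Spec_part_two data (part_two data)

-- ===== LEMMAS AND PROOFS =====

-- elements of cs at even (b = true) resp. odd (b = false) indices
def pvSel {α : Type} (b : Bool) : List α → List α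
  | [] => []
  | c :: cs => if b then c :: pvSel (!b) cs else pvSel (!b) cs

theorem pvDeltas_getD (c : Char) :
    pvDeltas.getD c (0, 0) =
      (if c = '>' then ((1 : Int), (0 : Int))
       else if c = '<' then (-1, 0)
       else if c = '^' then (0, 1)
       else if c = 'v' then (0, -1)
       else (0, 0)) := by
  simp [pvDeltas, PySem.Dict.ofList, PySem.Dict.update, PySem.Dict.getD_insert, PySem.Dict.getD_empty]
  split_ifs <;> simp_all

theorem pvSel_core_even {α : Type} : ∀ (xs : List α),
    List.filterMap (fun k : Nat => xs[2 * k]?) (List.range ((xs.length + 1) / 2)) = pvSel true xs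
  | [] => by simp [pvSel]
  | [a] => by simp [List.range_succ_eq_map, pvSel]
  | a :: b :: t => by
    have hlen : ((a :: b :: t).length + 1) / 2 = (t.length + 1) / 2 + 1 := by simp; omega
    rw [hlen, List.range_succ_eq_map, List.filterMap_cons]
    simp only [List.filterMap_map]
    have h : (List.filterMap ((fun k : Nat => (a :: b :: t)[2 * k]?) ∘ Nat.succ) (List.range ((t.length + 1) / 2)))
        = List.filterMap (fun k : Nat => t[2 * k]?) (List.range ((t.length + 1) / 2)) := by
      apply List.filterMap_congr
      intro k _
      simp only [Function.comp]
      rw [show 2 * Nat.succ k = 2 * k + 1 + 1 from by omega]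
      simp
    rw [h, pvSel_core_even t]
    simp [pvSel]

theorem pvSel_core_odd {α : Type} : ∀ (xs : List α),
    List.filterMap (fun k : Nat => xs[1 + 2 * k]?) (List.range (xs.length / 2)) = pvSel false xs
  | [] => by simp [pvSel]
  | [a] => by simp [pvSel]
  | a :: b :: t => by
    have hlen : (a :: b :: t).length / 2 = t.length / 2 + 1 := by simp; omega
    rw [hlen, List.range_succ_eq_map, List.filterMap_cons]
    simp only [List.filterMap_map]
    have h : (List.filterMap ((fun k : Nat => (a :: b :: t)[1 + 2 * k]?) ∘ Nat.succ) (List.range (t.length / 2)))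
        = List.filterMap (fun k : Nat => t[1 + 2 * k]?) (List.range (t.length / 2)) := by
      apply List.filterMap_congr
      intro k _
      simp only [Function.comp]
      rw [show 1 + 2 * Nat.succ k = 1 + 2 * k + 1 + 1 from by omega]
      simp
    rw [h, pvSel_core_odd t]
    simp [pvSel]

theorem pvSlice_even {α : Type} (xs : List α) :
    PySem.List.slice? xs (some 0) none 2 = some (pvSel true xs) := by
  rw [← pvSel_core_even]
  simp [PySem.List.slice?, PySem.List.sliceIndices]
  have hc : (if 0 < xs.length then (((xs.length : Int) + 2 - 1) / 2).toNat else 0) = (xs.length + 1) / 2 := by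
    split_ifs with h <;> omega
  rw [hc]
  apply List.filterMap_congr
  intro k _
  congr 1

theorem pvSlice_odd {α : Type} (xs : List α) :
    PySem.List.slice? xs (some 1) none 2 = some (pvSel false xs) := by
  rw [← pvSel_core_odd]
  by_cases h0 : xs.length = 0
  · rw [List.length_eq_zero_iff.mp h0]
    simp [PySem.List.slice?, PySem.List.sliceIndices]
  · simp [PySem.List.slice?, PySem.List.sliceIndices]
    have hmin : min 1 (xs.length : Int) = 1 := by omega
    rw [hmin]
    have hc : (if 1 < xs.length then (((xs.length : Int) - 1 + 2 - 1) / 2).toNat else 0) = xs.length / 2 := by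
      split_ifs with h <;> omega
    rw [hc]
    apply List.filterMap_congr
    intro k _
    congr 1

-- A's santa/robo move chain computes the same step as B's dict lookup
theorem pvMove_eq (p : Int × Int) (c : Char) :
    (if c = '>' then (p.1 + 1, p.2)
     else if c = '<' then (p.1 - 1, p.2)
     else if c = '^' then (p.1, p.2 + 1)
     else if c = 'v' then (p.1, p.2 - 1)
     else p) = (p.1 + (pvDeltas.getD c (0, 0)).1, p.2 + (pvDeltas.getD c (0, 0)).2) := by
  rw [pvDeltas_getD]
  split_ifs <;> simp [sub_eq_add_neg]

-- A's loop rephrased with an explicit parity flag (true = santa's turn)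
def pvGoA : Bool → (Int × Int) → (Int × Int) → PySem.Set (Int × Int) → List Char → PySem.Set (Int × Int)
  | _, _, _, vis, [] => vis
  | true, s, r, vis, c :: cs =>
    let s' := (s.1 + (pvDeltas.getD c (0, 0)).1, s.2 + (pvDeltas.getD c (0, 0)).2)
    pvGoA false s' r (PySem.Set.add vis s') cs
  | false, s, r, vis, c :: cs =>
    let r' := (r.1 + (pvDeltas.getD c (0, 0)).1, r.2 + (pvDeltas.getD c (0, 0)).2)
    pvGoA true s r' (PySem.Set.add vis r') cs

theorem pvFoldA_eq_goA : ∀ (cs : List Char) (i : Int) (s r : Int × Int) (vis : PySem.Set (Int × Int)),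
    ((PySem.List.enumerate cs i).foldl pvStepA (s, r, vis)).2.2
      = pvGoA (decide (PySem.Int.mod i 2 = 0)) s r vis cs
  | [], i, s, r, vis => by cases h : decide (PySem.Int.mod i 2 = 0) <;> simp [PySem.List.enumerate, pvGoA]
  | c :: cs, i, s, r, vis => by
    rw [PySem.List.enumerate_cons, List.foldl_cons]
    have hm : PySem.Int.mod i 2 = i % 2 := PySem.Int.mod_eq_emod_of_pos (by omega)
    have hm1 : PySem.Int.mod (i + 1) 2 = (i + 1) % 2 := PySem.Int.mod_eq_emod_of_pos (by omega)
    by_cases h : i % 2 = 0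
    · have h1 : (i + 1) % 2 = 1 := by omega
      simp only [pvStepA, hm, h]
      rw [pvFoldA_eq_goA cs (i + 1) _ _ _]
      simp [pvGoA, h1, pvMove_eq s c]
    · have h1 : i % 2 = 1 := by omega
      have h2 : (i + 1) % 2 = 0 := by omega
      simp only [pvStepA, hm, h1]
      norm_num
      rw [pvFoldA_eq_goA cs (i + 1) _ _ _]
      simp [pvGoA, h2, pvMove_eq r c]

theorem pvGoA_mem : ∀ (cs : List Char) (par : Bool) (s r : Int × Int) (vis : PySem.Set (Int × Int)) (y : Int × Int),
    (y ∈ pvGoA par s r vis cs ↔ y ∈ vis ∨ y ∈ pvWalk s (pvSel par cs) ∨ y ∈ pvWalk r (pvSel (!par) cs))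
  | [], par, s, r, vis, y => by cases par <;> simp [pvGoA, pvSel, pvWalk]
  | c :: cs, par, s, r, vis, y => by
    cases par
    · simp only [pvGoA, pvSel, Bool.not_false, if_neg (by decide : ¬(false = true))]
      rw [pvGoA_mem cs true s _ _ y]
      simp [PySem.Set.mem_add, pvWalk]
      tauto
    · simp only [pvGoA, pvSel, Bool.not_true]
      rw [pvGoA_mem cs false _ _ _ y]
      simp [PySem.Set.mem_add, pvWalk]
      tauto

theorem pvGoA_nodup : ∀ (cs : List Char) (par : Bool) (s r : Int × Int) (vis : PySem.Set (Int × Int)),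
    vis.Nodup → (pvGoA par s r vis cs).Nodup
  | [], par, s, r, vis, h => by cases par <;> exact h
  | c :: cs, par, s, r, vis, h => by
    cases par <;> exact pvGoA_nodup cs _ _ _ _ (PySem.Set.nodup_add _ _ h)

-- ===== VERDICT (by name: the statement is the Claim_ definition above) =====
theorem part_two_spec : Claim_equal_part_two := by
  intro data _
  unfold Spec_part_two part_two part_two_alt
  rw [pvSlice_even, pvSlice_odd]
  simp only [Option.getD_some]
  rw [pvFoldA_eq_goA, show (decide (PySem.Int.mod 0 2 = 0)) = true from by decide]
  simp only [PySem.Set.len]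
  congr 1
  apply List.Perm.length_eq
  rw [List.perm_ext_iff_of_nodup]
  · intro y
    rw [pvGoA_mem]
    simp [PySem.Set.mem_update, PySem.Set.mem_ofList]
    tauto
  · exact pvGoA_nodup _ _ _ _ _ (by simp [PySem.Set.add, PySem.Set.empty])
  · exact PySem.Set.nodup_update _ _ (PySem.Set.nodup_update _ _ (PySem.Set.nodup_ofList _))
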